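-- pv_equiv track=rewrite | github.com/istallia/nico-material-listup | listup_tool_lib.py | generateIdListText
-- ===== SOURCE A (Python) =====
-- def generateIdListText(id_list):
-- 	# すべてのIDを1列にまとめる
-- 	id_text = '[1-line]\n' + ' '.join(id_list) + '\n'
-- 	# 10件ごとにまとめる
-- 	id_text += '\n[each-10-ids]\n'
-- 	if len(id_list) < 1:
-- 		return ''
-- 	for i in range(len(id_list)):
-- 		if i % 10 == 9 or i == len(id_list) - 1:
-- 			id_text = id_text + id_list[i] + '\n'
-- 		else:
-- 			id_text = id_text + id_list[i] + ' '
-- 	return id_text[0:-1]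
-- ===== SOURCE B (Python) =====
-- def generateIdListText(id_list):
-- 	if not id_list:
-- 		return ''
-- 	header = '[1-line]\n' + ' '.join(id_list) + '\n\n[each-10-ids]\n'
-- 	chunks = [id_list[i:i+10] for i in range(0, len(id_list), 10)]
-- 	return header + '\n'.join(' '.join(chunk) for chunk in chunks)
-- ===== Notes on version B (the rewrite author's own statement) =====
-- stated objective: faster
-- what changed: Replaces the per-index loop (with its i%10/last-index branch, per-step string concatenation and final [0:-1] trim) by slicing the list into 10-element chunks and join-ing: ' '.join per chunk, ' '.join over chunks, so no trailing separator ever has to be cut off.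
import Mathlib
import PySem

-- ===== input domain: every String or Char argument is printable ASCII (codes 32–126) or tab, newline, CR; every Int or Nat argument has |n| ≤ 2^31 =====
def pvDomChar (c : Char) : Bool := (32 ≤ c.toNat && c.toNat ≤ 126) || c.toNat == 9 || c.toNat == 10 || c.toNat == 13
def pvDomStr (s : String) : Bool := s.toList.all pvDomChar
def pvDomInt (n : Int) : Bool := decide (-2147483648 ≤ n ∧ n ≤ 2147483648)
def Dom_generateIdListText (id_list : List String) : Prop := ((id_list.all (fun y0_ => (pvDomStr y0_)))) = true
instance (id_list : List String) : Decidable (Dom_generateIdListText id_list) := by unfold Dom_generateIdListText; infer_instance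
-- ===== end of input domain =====

-- B replaces A's per-index loop (i%10 / last-index branch plus a final [0:-1] trim)
-- by slicing the list into 10-element chunks and joining them; objective: simpler.

-- ===== PORT A =====
def generateIdListText (id_list : List String) : String :=
  let id_text := "[1-line]\n" ++ PySem.Str.join " " id_list ++ "\n"
  let id_text := id_text ++ "\n[each-10-ids]\n"
  if PySem.List.len id_list < 1 then ""
  else
    let id_text :=
      (PySem.List.pyRange 0 (PySem.List.len id_list)).foldl
        (fun acc i =>
          if PySem.Int.mod i 10 = 9 ∨ i = PySem.List.len id_list - 1 then
            acc ++ PySem.List.pyGetD id_list i "" ++ "\n"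
          else
            acc ++ PySem.List.pyGetD id_list i "" ++ " ")
        id_text
    PySem.Str.slice id_text (some 0) (some (-1))

-- ===== PORT B =====
def generateIdListText_alt (id_list : List String) : String :=
  if id_list = [] then ""
  else
    let header := "[1-line]\n" ++ PySem.Str.join " " id_list ++ "\n\n[each-10-ids]\n"
    let chunks :=
      (PySem.List.pyRange 0 (PySem.List.len id_list) 10).map
        (fun i => PySem.List.slice id_list (some i) (some (i + 10)))
    header ++ PySem.Str.join "\n" (chunks.map (fun chunk => PySem.Str.join " " chunk))

-- ===== PRECONDITION & SPEC =====
def Spec_generateIdListText (id_list : List String) (out : String) : Prop := out = generateIdListText_alt id_list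
instance (id_list : List String) (out : String) : Decidable (Spec_generateIdListText id_list out) := by unfold Spec_generateIdListText; infer_instance

-- ===== CLAIM (what is proved, stated in full; the proofs are below) =====
def Claim_equal_generateIdListText : Prop := ∀ (id_list : List String), Dom_generateIdListText id_list → Spec_generateIdListText id_list (generateIdListText id_list)

-- ===== LEMMAS AND PROOFS =====

-- char-level recursive description of A's loop (s = current index; the '\n' fires
-- after every 10th element and after the last one)
def pvGb : ℕ → List (List Char) → List Char
  | _, [] => []
  | _, [x] => x ++ ['\n']
  | s, x :: y :: t => x ++ (if s % 10 = 9 then ['\n'] else [' ']) ++ pvGb (s + 1) (y :: t)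

-- split a list into chunks of 10
def pvChunk {α : Type} : List α → List (List α)
  | [] => []
  | x :: t => ((x :: t).take 10) :: pvChunk ((x :: t).drop 10)
termination_by l => l.length
decreasing_by simp

lemma pvFoldl_toList {α : Type} (l : List α) (f : String → α → String)
    (g : List Char → α → List Char) (h : ∀ a x, (f a x).toList = g a.toList x)
    (a : String) : (l.foldl f a).toList = l.foldl g a.toList := by
  induction l generalizing a with
  | nil => rfl
  | cons x t ih => simp only [List.foldl_cons, ih, h]

lemma pvJoin_cons (sep a : List Char) (l : List (List Char)) (h : l ≠ []) :
    PySem.Chars.join sep (a :: l) = a ++ sep ++ PySem.Chars.join sep l := by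
  cases l with
  | nil => exact absurd rfl h
  | cons b t => exact PySem.Chars.join_cons_cons sep a b t

-- A's loop over the enumerated list is pvGb
lemma pvL (xs : List String) : ∀ (s : ℕ) (n : ℤ) (acc : List Char), n = s + xs.length →
    (PySem.List.enumerate xs s).foldl
      (fun acc (p : ℤ × String) =>
        if PySem.Int.mod p.1 10 = 9 ∨ p.1 = n - 1 then acc ++ p.2.toList ++ ['\n']
        else acc ++ p.2.toList ++ [' ']) acc
    = acc ++ pvGb s (xs.map String.toList) := by
  induction xs with
  | nil => intro s n acc h; simp [PySem.List.enumerate, pvGb]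
  | cons x t ih =>
    intro s n acc h
    rw [PySem.List.enumerate_cons]
    simp only [List.foldl_cons]
    have hmod : (PySem.Int.mod (s:ℤ) 10 = 9) ↔ (s % 10 = 9) := by
      simp [PySem.Int.mod, Int.fmod_eq_emod]; omega
    cases t with
    | nil =>
      have hcond : ((s:ℤ) = n - 1) := by simp at h; omega
      by_cases h9 : s % 10 = 9 <;>
        simp [hcond, pvGb, PySem.List.enumerate]
    | cons y t' =>
      have hne : (s:ℤ) ≠ n - 1 := by simp at h; omega
      have hstep : ((s:ℤ) + 1) = ((s+1 : ℕ) : ℤ) := by push_cast; ring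
      by_cases h9 : s % 10 = 9
      · rw [if_pos (Or.inl (hmod.mpr h9)), hstep,
          ih (s+1) n _ (by simp at h ⊢; omega)]
        simp [pvGb, h9]
      · rw [if_neg (by push Not; exact ⟨fun c => h9 (hmod.mp c), hne⟩), hstep,
          ih (s+1) n _ (by simp at h ⊢; omega)]
        simp [pvGb, h9]

-- pvGb peels off one chunk of (up to) 10 - s % 10 elements
lemma pvGb_split (xs : List (List Char)) : ∀ (s : ℕ), xs ≠ [] →
    pvGb s xs = if xs.length ≤ 10 - s % 10 then PySem.Chars.join [' '] xs ++ ['\n']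
      else PySem.Chars.join [' '] (xs.take (10 - s % 10)) ++ ['\n'] ++
        pvGb (s + (10 - s % 10)) (xs.drop (10 - s % 10)) := by
  induction xs with
  | nil => intro s h; exact absurd rfl h
  | cons x t ih =>
    intro s _
    cases t with
    | nil =>
      have hm : s % 10 < 10 := Nat.mod_lt _ (by norm_num)
      rw [if_pos (by simp; omega)]
      simp [pvGb, PySem.Chars.join_singleton]
    | cons y t' =>
      have hm : s % 10 < 10 := Nat.mod_lt _ (by norm_num)
      by_cases h9 : s % 10 = 9
      · rw [if_neg (by simp [h9])]
        simp [pvGb, h9, PySem.Chars.join_singleton]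
      · have hs1 : (s+1) % 10 = s % 10 + 1 := by omega
        have := ih (s+1) (by simp)
        rw [hs1] at this
        simp only [pvGb, if_neg h9, this]
        by_cases hlen : (y :: t').length ≤ 10 - (s % 10 + 1)
        · rw [if_pos hlen, if_pos (by simp at hlen ⊢; omega)]
          rw [pvJoin_cons [' '] x (y :: t') (by simp)]
          simp [List.append_assoc]
        · rw [if_neg hlen, if_neg (by simp at hlen ⊢; omega)]
          have hnum : 10 - s % 10 = (10 - (s % 10 + 1)) + 1 := by omega
          have htk : (x :: y :: t').take (10 - s % 10) =
              x :: (y :: t').take (10 - (s % 10 + 1)) := by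
            rw [hnum, List.take_succ_cons]
          have hdr : (x :: y :: t').drop (10 - s % 10) =
              (y :: t').drop (10 - (s % 10 + 1)) := by
            rw [hnum, List.drop_succ_cons]
          have hadd : s + 1 + (10 - (s % 10 + 1)) = s + (10 - s % 10) := by omega
          rw [htk, hdr, hadd, pvJoin_cons [' '] x ((y :: t').take (10 - (s % 10 + 1)))
            (by simp [List.take_eq_nil_iff]; omega)]
          simp [List.append_assoc]

-- at a chunk boundary, pvGb is the '\n'-join of the space-joined chunks plus '\n'
lemma pvGb_rows (N : ℕ) : ∀ (xs : List (List Char)) (s : ℕ), N = xs.length → xs ≠ [] →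
    s % 10 = 0 →
    pvGb s xs =
      PySem.Chars.join ['\n'] ((pvChunk xs).map (PySem.Chars.join [' '])) ++ ['\n'] := by
  induction N using Nat.strong_induction_on with
  | _ N ih =>
    intro xs s hN hne hs
    have h10 : 10 - s % 10 = 10 := by omega
    rw [pvGb_split xs s hne, h10]
    obtain ⟨x, t, rfl⟩ := List.exists_cons_of_ne_nil hne
    by_cases hlen : (x :: t).length ≤ 10
    · rw [if_pos hlen, pvChunk, List.drop_eq_nil_of_le hlen, pvChunk,
        List.take_of_length_le hlen]
      simp [PySem.Chars.join_singleton]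
    · rw [if_neg hlen, pvChunk]
      have hdne : (x :: t).drop 10 ≠ [] := by
        simp only [ne_eq, List.drop_eq_nil_iff]
        omega
      rw [List.map_cons,
        pvJoin_cons ['\n'] _ (((pvChunk ((x :: t).drop 10)).map (PySem.Chars.join [' '])))
          (by obtain ⟨z, u, hzu⟩ := List.exists_cons_of_ne_nil hdne; rw [hzu, pvChunk]; simp),
        ih (N - 10) (by omega) _ (s + 10) (by simp at hN ⊢; omega) hdne (by omega)]
      simp [List.append_assoc]

-- pvChunk commutes with map
lemma pvChunk_map (N : ℕ) : ∀ (xs : List String), N = xs.length →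
    pvChunk (xs.map String.toList) = (pvChunk xs).map (List.map String.toList) := by
  induction N using Nat.strong_induction_on with
  | _ N ih =>
    intro xs hN
    cases xs with
    | nil => simp [pvChunk]
    | cons x t =>
      rw [List.map_cons, pvChunk, pvChunk, List.map_cons]
      congr 1
      · rw [← List.map_cons, ← List.map_take]
      · rw [← List.map_cons, ← List.map_drop]
        exact ih (N - 10) (by simp at hN; omega) _ (by simp at hN ⊢; omega)

-- the range(0, n, 10) chunk comprehension, in take/drop form, is pvChunk
lemma pvRangeChunk {α : Type} (N : ℕ) : ∀ (xs : List α), N = xs.length →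
    (List.range (((N : ℤ) + 9) / 10).toNat).map (fun k => (xs.drop (10 * k)).take 10)
      = pvChunk xs := by
  induction N using Nat.strong_induction_on with
  | _ N ih =>
    intro xs hN
    cases xs with
    | nil => simp at hN; subst hN; simp [pvChunk]
    | cons x t =>
      rw [pvChunk]
      have h1 : 1 ≤ N := by simp at hN; omega
      have hpos : (((N : ℤ) + 9) / 10).toNat = ((((N - 10 : ℕ) : ℤ) + 9) / 10).toNat + 1 := by
        omega
      rw [hpos, List.range_succ_eq_map]
      simp only [List.map_cons, List.map_map]
      congr 1
      have hc : ((fun k => ((x :: t).drop (10 * k)).take 10) ∘ Nat.succ)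
          = fun k => ((t.drop 9).drop (10 * k)).take 10 := by
        funext k
        have h2 : 10 * Nat.succ k = (9 + 10 * k) + 1 := by omega
        simp only [Function.comp_apply, h2, List.drop_succ_cons, List.drop_drop]
      rw [hc]
      exact ih (N - 10) (by omega) _ (by simp at hN ⊢; omega)

-- B's slice comprehension is pvChunk
lemma pvChunks_eq (xs : List String) :
    (PySem.List.pyRange 0 (PySem.List.len xs) 10).map
      (fun i => PySem.List.slice xs (some i) (some (i + 10))) = pvChunk xs := by
  cases xs with
  | nil =>
    rw [PySem.List.pyRange_of_pos 0 _ (by norm_num)]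
    simp [pvChunk]
  | cons x t =>
    rw [PySem.List.pyRange_of_pos 0 _ (by norm_num)]
    rw [if_pos (by simp only [PySem.List.len_eq, List.length_cons]; omega)]
    simp only [List.map_map]
    have hfun : ((fun i => PySem.List.slice (x :: t) (some i) (some (i + 10))) ∘
        (fun k : ℕ => (0 : ℤ) + 10 * (k : ℤ)))
        = fun k : ℕ => ((x :: t).drop (10 * k)).take 10 := by
      funext k
      simp only [Function.comp_apply, zero_add]
      rw [show (10 * (k : ℤ)) = ((10 * k : ℕ) : ℤ) from by push_cast; ring,
        show ((10 * k : ℕ) : ℤ) + 10 = ((10 * k + 10 : ℕ) : ℤ) from by push_cast; ring,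
        PySem.List.slice_natCast]
      congr 1
      omega
    rw [hfun]
    have hcnt : ((PySem.List.len (x :: t) - 0 + 10 - 1) / 10).toNat
        = ((((x :: t).length : ℤ) + 9) / 10).toNat := by
      rw [PySem.List.len_eq]
      omega
    rw [hcnt]
    exact pvRangeChunk _ _ rfl

-- ===== VERDICT (by name: the statement is the Claim_ definition above) =====
theorem generateIdListText_spec : Claim_equal_generateIdListText := by
  unfold Claim_equal_generateIdListText Spec_generateIdListText
  intro xs _
  by_cases hxs : xs = []
  · subst hxs; decide
  · have hlen : 0 < xs.length := List.length_pos_of_ne_nil hxs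
    simp only [generateIdListText, generateIdListText_alt]
    rw [if_neg (by rw [PySem.List.len_eq]; omega), if_neg hxs]
    apply String.toList_inj.mp
    -- A side: turn the pyRange fold into an enumerate fold
    have hA : ∀ acc : String,
        (PySem.List.pyRange 0 (PySem.List.len xs)).foldl
          (fun acc i =>
            if PySem.Int.mod i 10 = 9 ∨ i = PySem.List.len xs - 1 then
              acc ++ PySem.List.pyGetD xs i "" ++ "\n"
            else acc ++ PySem.List.pyGetD xs i "" ++ " ") acc
        = (PySem.List.enumerate xs).foldl
          (fun acc (p : ℤ × String) =>
            if PySem.Int.mod p.1 10 = 9 ∨ p.1 = PySem.List.len xs - 1 then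
              acc ++ p.2 ++ "\n"
            else acc ++ p.2 ++ " ") acc := by
      intro acc
      rw [PySem.List.enumerate_eq_map_pyRange xs "", List.foldl_map]
    rw [hA, PySem.Str.toList_slice, PySem.Chars.slice_eq_listSlice,
      PySem.List.slice_zero_start, PySem.List.slice_to_neg_one]
    rw [pvFoldl_toList _ _
      (fun (a : List Char) (p : ℤ × String) =>
        if PySem.Int.mod p.1 10 = 9 ∨ p.1 = PySem.List.len xs - 1 then a ++ p.2.toList ++ ['\n']
        else a ++ p.2.toList ++ [' '])
      (by intro a p
          beta_reduce
          rcases Decidable.em (PySem.Int.mod p.1 10 = 9 ∨ p.1 = PySem.List.len xs - 1) with hc | hc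
          · rw [if_pos hc, if_pos hc]
            simp only [String.toList_append, List.append_assoc]
            rfl
          · rw [if_neg hc, if_neg hc]
            simp only [String.toList_append, List.append_assoc]
            rfl)]
    rw [show (PySem.List.enumerate xs) = (PySem.List.enumerate xs ((0:ℕ):ℤ)) from by norm_num]
    rw [pvL xs 0 (PySem.List.len xs) _ (by rw [PySem.List.len_eq]; push_cast; ring)]
    rw [pvGb_rows (xs.map String.toList).length _ 0 rfl (by simpa using hxs) (by norm_num)]
    rw [← List.append_assoc, List.dropLast_concat]
    -- B side
    rw [pvChunks_eq xs, pvChunk_map xs.length xs rfl]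
    have h1 : (" ".toList) = [' '] := rfl
    have h2 : ("\n".toList) = ['\n'] := rfl
    have hA1 : "[1-line]\n".toList = ['[','1','-','l','i','n','e',']','\n'] := rfl
    have hA2 : "\n[each-10-ids]\n".toList
        = ['\n','[','e','a','c','h','-','1','0','-','i','d','s',']','\n'] := rfl
    have hB1 : "\n\n[each-10-ids]\n".toList
        = ['\n','\n','[','e','a','c','h','-','1','0','-','i','d','s',']','\n'] := rfl
    simp only [String.toList_append, PySem.Str.toList_join, List.map_map, Function.comp_def,
      h1, h2, hA1, hA2, hB1]
    simp [List.append_assoc]
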